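-- pv_equiv track=rewrite | github.com/mithrantir/CodinGame | practice/puzzles/medium/Anagrams.py | reverse_phase_3
-- ===== SOURCE A (Python) =====
-- alpha = "ABCDEFGHIJKLMNOPQRSTUVWXYZ"
--
-- def reverse_phase_3(phrase):
--     phrase_list, hold_let, hold_ind = [c for c in phrase], [], []
--     for i in range(len(phrase_list)):
--         if phrase_list[i].isalpha() and alpha.index(phrase_list[i]) % 4 == 3:
--             hold_ind.append(i)
--             hold_let.append(phrase_list[i])
--
--     if len(hold_let) > 1:
--         hold_let_shift = [hold_let[-1]] + hold_let[0:len(hold_let)-1]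
--         for i in range(len(hold_ind)):
--             phrase_list[hold_ind[i]] = hold_let_shift[i]
--     return "".join(c for c in phrase_list)
-- ===== SOURCE B (Python) =====
-- alpha = "ABCDEFGHIJKLMNOPQRSTUVWXYZ"
--
-- def reverse_phase_3(phrase):
--     # One forward pass with a carried letter: each matching position receives the
--     # previously seen matching letter; the carry is seeded with the LAST matching
--     # letter (found by one scan from the end), which realises the cyclic shift
--     # without ever building or rotating a list of matches.
--     carry = None
--     for c in reversed(phrase):
--         if c.isalpha() and alpha.index(c) % 4 == 3:
--             carry = c
--             break
--     out = []
--     for c in phrase: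
--         if c.isalpha() and alpha.index(c) % 4 == 3:
--             out.append(carry)
--             carry = c
--         else:
--             out.append(c)
--     return "".join(out)
-- ===== Notes on version B (the rewrite author's own statement) =====
-- stated objective: alternative
-- what changed: A builds lists of matched indices and letters, rotates the letter list and writes it back into a mutable char list by index; B never materialises or rotates a match list: it seeds a single carried letter with the last matching letter (one scan from the end) and makes one forward pass where each matching position emits the carry and the carry becomes that letter.
import Mathlib
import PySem

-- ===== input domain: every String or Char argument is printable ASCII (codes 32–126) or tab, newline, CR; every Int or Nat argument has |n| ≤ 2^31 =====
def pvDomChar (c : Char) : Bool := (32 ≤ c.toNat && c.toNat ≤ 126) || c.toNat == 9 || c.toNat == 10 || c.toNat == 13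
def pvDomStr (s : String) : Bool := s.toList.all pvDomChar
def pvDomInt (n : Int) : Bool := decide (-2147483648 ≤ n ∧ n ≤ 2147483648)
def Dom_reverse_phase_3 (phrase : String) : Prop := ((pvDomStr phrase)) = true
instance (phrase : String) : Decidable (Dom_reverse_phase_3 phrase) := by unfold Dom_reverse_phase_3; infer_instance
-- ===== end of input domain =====

-- B replaces A's match-list + rotation + indexed write-back by a single forward pass
-- threading one carried letter, seeded with the last matching letter (objective: alternative).
-- Both programs raise ValueError on lowercase letters (alpha.index), excluded by Pre_.

-- ===== PORT A =====
def pvAlpha : List Char := "ABCDEFGHIJKLMNOPQRSTUVWXYZ".toList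

-- c.isalpha() and alpha.index(c) % 4 == 3  (appears verbatim in both A and B).
-- The `.getD 0` arm is reached exactly where Python's alpha.index raises ValueError
-- (an alphabetic char not in pvAlpha, i.e. a lowercase letter inside Dom); Pre_ excludes those.
def pvPred (c : Char) : Bool :=
  PySem.Chars.isalpha c && (((PySem.List.index? pvAlpha c).getD 0) % 4 == 3)

def reverse_phase_3 (phrase : String) : String :=
  let phrase_list := phrase.toList
  -- for i in range(len(phrase_list)): collect hold_ind, hold_let
  -- (loop indices and hold_ind entries are nonnegative and in range by construction,
  --  so Nat indexing with getD / List.set is exact here)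
  let st :=
    (List.range phrase_list.length).foldl
      (fun (st : List Nat × List Char) i =>
        if pvPred (phrase_list.getD i default) then
          (st.1 ++ [i], st.2 ++ [phrase_list.getD i default])
        else st) ([], [])
  let hold_ind := st.1
  let hold_let := st.2
  let phrase_list2 :=
    if hold_let.length > 1 then
      -- hold_let_shift = [hold_let[-1]] + hold_let[0:len(hold_let)-1]
      let hold_let_shift :=
        [PySem.List.pyGetD hold_let (-1) default] ++
          PySem.List.slice hold_let (some 0) (some ((hold_let.length : Int) - 1))
      (List.range hold_ind.length).foldl
        (fun pl i => pl.set (hold_ind.getD i 0) (hold_let_shift.getD i default)) phrase_list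
    else phrase_list
  String.ofList phrase_list2   -- "".join(c for c in phrase_list)

-- ===== PORT B =====
-- for c in reversed(phrase): first match = the last matching letter of phrase
def pvFindCarry : List Char → Option Char
  | [] => none
  | c :: rest => if pvPred c then some c else pvFindCarry rest

-- the forward pass: emit the carry at a match and make the match the new carry.
-- carry.getD default is reached only when carry is none at a match, which never
-- happens (carry is none only when phrase has no match at all); Python's `carry`
-- is likewise only read when it was set.
def pvPass : List Char → Option Char → List Char
  | [], _ => []
  | c :: rest, carry =>
    if pvPred c then carry.getD default :: pvPass rest (some c)
    else c :: pvPass rest carry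

def reverse_phase_3_alt (phrase : String) : String :=
  let cs := phrase.toList
  let carry := pvFindCarry cs.reverse
  String.ofList (pvPass cs carry)

-- ===== PRECONDITION & SPEC =====
-- A raises ValueError (alpha.index on a lowercase letter, which is alphabetic but not in
-- alpha) exactly on phrases containing a lowercase ASCII letter; B raises there too.
def Pre_reverse_phase_3 (phrase : String) : Prop :=
  (phrase.toList.all (fun c => !(97 ≤ c.toNat && c.toNat ≤ 122))) = true
instance (phrase : String) : Decidable (Pre_reverse_phase_3 phrase) := by
  unfold Pre_reverse_phase_3; infer_instance

def pvWitness_reverse_phase_3 : String := "HELLO, WORLD 123!"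

def Spec_reverse_phase_3 (phrase : String) (out : String) : Prop := out = reverse_phase_3_alt phrase
instance (phrase : String) (out : String) : Decidable (Spec_reverse_phase_3 phrase out) := by unfold Spec_reverse_phase_3; infer_instance

-- ===== CLAIM (what is proved, stated in full; the proofs are below) =====
def Claim_equal_reverse_phase_3 : Prop := ∀ (phrase : String), Dom_reverse_phase_3 phrase → Pre_reverse_phase_3 phrase → Spec_reverse_phase_3 phrase (reverse_phase_3 phrase)

-- ===== LEMMAS AND PROOFS =====

-- proof-side: rebuild cs consuming one letter of rot per matching char
def pvRebuild : List Char → List Char → List Char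
  | [], _ => []
  | c :: rest, rot =>
    if pvPred c then rot.headD default :: pvRebuild rest rot.tail
    else c :: pvRebuild rest rot

-- positions of the matching chars, starting at offset k (proof-side mirror of hold_ind)
def pvIdxs : List Char → Nat → List Nat
  | [], _ => []
  | c :: cs, k => if pvPred c then k :: pvIdxs cs (k + 1) else pvIdxs cs (k + 1)

lemma pvIdxs_succ (cs : List Char) : ∀ k, pvIdxs cs (k + 1) = (pvIdxs cs k).map (· + 1) := by
  induction cs with
  | nil => intro k; simp [pvIdxs]
  | cons c cs ih =>
    intro k
    by_cases h : pvPred c = true <;> simp [pvIdxs, h, ih]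

lemma pvIdxs_append (cs : List Char) (x : Char) : ∀ k,
    pvIdxs (cs ++ [x]) k = pvIdxs cs k ++ (if pvPred x then [k + cs.length] else []) := by
  induction cs with
  | nil => intro k; by_cases h : pvPred x = true <;> simp [pvIdxs, h]
  | cons c cs ih =>
    intro k
    by_cases h : pvPred c = true <;>
      simp [pvIdxs, h, ih (k + 1)] <;> ring_nf

lemma pvIdxs_length (cs : List Char) : ∀ k, (pvIdxs cs k).length = (cs.filter pvPred).length := by
  induction cs with
  | nil => intro k; simp [pvIdxs]
  | cons c cs ih =>
    intro k
    by_cases h : pvPred c = true <;> simp [pvIdxs, h, ih]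

-- A's first loop collects exactly (pvIdxs cs 0, cs.filter pvPred)
lemma pvLoop1_eq (cs : List Char) : ∀ acc : List Nat × List Char,
    (List.range cs.length).foldl
      (fun st i => if pvPred (cs.getD i default) then
          (st.1 ++ [i], st.2 ++ [cs.getD i default]) else st) acc
      = (acc.1 ++ pvIdxs cs 0, acc.2 ++ cs.filter pvPred) := by
  induction cs using List.reverseRecOn with
  | nil => intro acc; simp [pvIdxs]
  | append_singleton cs x ih =>
    intro acc
    have hlen : (cs ++ [x]).length = cs.length + 1 := by simp
    rw [hlen, List.range_succ, List.foldl_append]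
    have hcongr :
        (List.range cs.length).foldl
          (fun st i => if pvPred ((cs ++ [x]).getD i default) then
              (st.1 ++ [i], st.2 ++ [(cs ++ [x]).getD i default]) else st) acc
        = (List.range cs.length).foldl
          (fun st i => if pvPred (cs.getD i default) then
              (st.1 ++ [i], st.2 ++ [cs.getD i default]) else st) acc := by
      apply PySem.List.foldl_congr_mem
      intro a i hi
      have hi' : i < cs.length := List.mem_range.mp hi
      have : (cs ++ [x]).getD i default = cs.getD i default := by
        simp [List.getD, List.getElem?_append_left hi']
      rw [this]
    rw [hcongr, ih acc]
    have hx : (cs ++ [x]).getD cs.length default = x := by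
      simp [List.getD]
    simp only [List.foldl_cons, List.foldl_nil, hx]
    by_cases h : pvPred x = true <;>
      simp [h, pvIdxs_append, List.filter_append]

-- A's second loop is a left fold of point updates over the zipped (index, letter) pairs
lemma pvLoop2_eq : ∀ (inds : List Nat) (shift cs : List Char),
    shift.length = inds.length →
    (List.range inds.length).foldl
      (fun pl i => pl.set (inds.getD i 0) (shift.getD i default)) cs
    = (inds.zip shift).foldl (fun pl p => pl.set p.1 p.2) cs := by
  intro inds
  induction inds with
  | nil => intro shift cs _; simp
  | cons j rest ih =>
    intro shift cs hlen
    match shift with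
    | [] => simp at hlen
    | s :: srest =>
      simp only [List.length_cons, List.range_succ_eq_map, List.foldl_cons, List.foldl_map,
        List.getD_cons_zero, List.getD_cons_succ, Nat.succ_eq_add_one, List.zip_cons_cons]
      exact ih srest (cs.set j s) (by simpa using hlen)

-- a fold of point updates at positions all shifted by one leaves the head untouched
lemma pvWrite_shift : ∀ (ps : List (Nat × Char)) (y : Char) (ys : List Char),
    (ps.map (fun p => (p.1 + 1, p.2))).foldl (fun pl p => pl.set p.1 p.2) (y :: ys)
    = y :: ps.foldl (fun pl p => pl.set p.1 p.2) ys := by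
  intro ps
  induction ps with
  | nil => intro y ys; simp
  | cons p ps ih =>
    intro y ys
    simp only [List.map_cons, List.foldl_cons, List.set_cons_succ]
    exact ih y (ys.set p.1 p.2)

-- writing `shift` at the matched positions = one reconstruction pass
lemma pvWrite_eq_rebuild : ∀ (cs shift : List Char),
    shift.length = (cs.filter pvPred).length →
    ((pvIdxs cs 0).zip shift).foldl (fun pl p => pl.set p.1 p.2) cs
    = pvRebuild cs shift := by
  intro cs
  induction cs with
  | nil => intro shift _; simp [pvIdxs, pvRebuild]
  | cons c cs ih =>
    intro shift hlen
    by_cases h : pvPred c = true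
    · rw [List.filter_cons_of_pos h] at hlen
      match shift with
      | [] => simp at hlen
      | s :: srest =>
        simp only [pvIdxs, h, if_pos, pvIdxs_succ cs 0, List.zip_cons_cons,
          List.zip_map_left, List.foldl_cons, List.set_cons_zero, List.foldl_map]
        have := pvWrite_shift ((pvIdxs cs 0).zip srest) s cs
        simp only [List.foldl_map] at this
        rw [show (Prod.map (· + 1) id : Nat × Char → Nat × Char)
              = (fun p => (p.1 + 1, p.2)) from rfl] at *
        calc ((pvIdxs cs 0).zip srest).foldl
                (fun pl p => pl.set (p.1 + 1) p.2) (s :: cs)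
            = s :: ((pvIdxs cs 0).zip srest).foldl (fun pl p => pl.set p.1 p.2) cs := this
          _ = s :: pvRebuild cs srest := by
                rw [ih srest (by simpa using hlen)]
          _ = pvRebuild (c :: cs) (s :: srest) := by simp [pvRebuild, h]
    · rw [List.filter_cons_of_neg (by simpa using h)] at hlen
      simp only [pvIdxs, h, if_neg, Bool.false_eq_true, not_false_eq_true,
        pvIdxs_succ cs 0, List.zip_map_left, List.foldl_map]
      have := pvWrite_shift ((pvIdxs cs 0).zip shift) c cs
      simp only [List.foldl_map] at this
      rw [show (Prod.map (· + 1) id : Nat × Char → Nat × Char)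
            = (fun p => (p.1 + 1, p.2)) from rfl] at *
      calc ((pvIdxs cs 0).zip shift).foldl
              (fun pl p => pl.set (p.1 + 1) p.2) (c :: cs)
          = c :: ((pvIdxs cs 0).zip shift).foldl (fun pl p => pl.set p.1 p.2) cs := this
        _ = c :: pvRebuild cs shift := by rw [ih shift hlen]
        _ = pvRebuild (c :: cs) shift := by simp [pvRebuild, h]

-- rebuilding with the unrotated matches is the identity
lemma pvRebuild_filter (cs : List Char) : pvRebuild cs (cs.filter pvPred) = cs := by
  induction cs with
  | nil => simp [pvRebuild]
  | cons c cs ih =>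
    by_cases h : pvPred c = true <;>
      simp [pvRebuild, h, ih]

-- rebuild ignores letters beyond the number of matches
lemma pvRebuild_tail_irrel : ∀ (cs r s : List Char),
    (cs.filter pvPred).length ≤ r.length →
    pvRebuild cs (r ++ s) = pvRebuild cs r := by
  intro cs
  induction cs with
  | nil => intro r s _; simp [pvRebuild]
  | cons c cs ih =>
    intro r s hlen
    by_cases h : pvPred c = true
    · rw [List.filter_cons_of_pos h] at hlen
      match r with
      | [] => simp at hlen
      | x :: xs =>
        simp only [pvRebuild, h, if_pos, List.cons_append, List.headD_cons, List.tail_cons]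
        rw [ih xs s (by simpa using hlen)]
    · rw [List.filter_cons_of_neg (by simpa using h)] at hlen
      simp only [pvRebuild, h, if_neg, Bool.false_eq_true, not_false_eq_true]
      rw [ih r s hlen]

-- B's pass with carry x = rebuild with x followed by the matches themselves
lemma pvPass_some : ∀ (cs : List Char) (x : Char),
    pvPass cs (some x) = pvRebuild cs (x :: cs.filter pvPred) := by
  intro cs
  induction cs with
  | nil => intro x; simp [pvPass, pvRebuild]
  | cons c cs ih =>
    intro x
    by_cases h : pvPred c = true <;>
      simp [pvPass, pvRebuild, h, ih]

-- with no match, the pass is the identity for any carry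
lemma pvPass_nomatch : ∀ (cs : List Char), cs.filter pvPred = [] →
    ∀ carry, pvPass cs carry = cs := by
  intro cs
  induction cs with
  | nil => intro _ carry; simp [pvPass]
  | cons c cs ih =>
    intro hf carry
    by_cases h : pvPred c = true
    · simp [List.filter_cons_of_pos h] at hf
    · rw [List.filter_cons_of_neg (by simpa using h)] at hf
      simp [pvPass, h, ih hf]

-- the reversed scan finds the last matching letter
lemma pvFindCarry_eq : ∀ (l : List Char), pvFindCarry l = (l.filter pvPred).head? := by
  intro l
  induction l with
  | nil => simp [pvFindCarry]
  | cons c cs ih =>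
    by_cases h : pvPred c = true <;> simp [pvFindCarry, h, ih]

lemma pvFindCarry_reverse (cs : List Char) :
    pvFindCarry cs.reverse = (cs.filter pvPred).getLast? := by
  rw [pvFindCarry_eq, List.filter_reverse, List.head?_reverse]

-- A's shift list equals getLast :: dropLast of the matches (when more than one match)
lemma pvShift_eq (l : List Char) (g : Char) (hg : l.getLast? = some g) (h : 1 < l.length) :
    [PySem.List.pyGetD l (-1) default] ++
      PySem.List.slice l (some 0) (some ((l.length : Int) - 1))
    = g :: l.dropLast := by
  have hne : l ≠ [] := by intro he; rw [he] at hg; simp at hg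
  have h1 : PySem.List.pyGetD l (-1) default = g := by
    rw [PySem.List.pyGetD_neg_one (h := hne)]
    rw [List.getLast?_eq_getLast_of_ne_nil hne] at hg
    exact Option.some.inj hg
  have h2 : PySem.List.slice l (some 0) (some ((l.length : Int) - 1)) = l.dropLast := by
    rw [PySem.List.slice_toNat l (a := 0) (b := (l.length : Int) - 1) (by omega) (by omega)]
    have h3 : ((l.length : Int) - 1).toNat - (0 : Int).toNat = l.length - 1 := by omega
    rw [h3]
    simp [List.dropLast_eq_take]
  rw [h1, h2]
  rfl

-- rebuild with (g :: ms ++ [g]) drops the unread trailing g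
lemma pvRebuild_cons_split (cs : List Char) (g : Char) (r : List Char)
    (hr : (cs.filter pvPred).length ≤ r.length + 1) :
    pvRebuild cs ((g :: r) ++ [g]) = pvRebuild cs (g :: r) :=
  pvRebuild_tail_irrel cs (g :: r) [g] (by simpa using hr)

theorem reverse_phase_3_eq_alt (phrase : String) :
    reverse_phase_3 phrase = reverse_phase_3_alt phrase := by
  unfold reverse_phase_3 reverse_phase_3_alt
  simp only
  rw [pvLoop1_eq phrase.toList ([], [])]
  simp only [List.nil_append]
  rw [pvFindCarry_reverse]
  by_cases hnil : phrase.toList.filter pvPred = []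
  · -- no match: A skips the write-back, B's pass is the identity
    rw [hnil]
    simp only [List.length_nil, List.getLast?_nil]
    rw [if_neg (by omega), pvPass_nomatch phrase.toList hnil none]
  · obtain ⟨g, hg⟩ := Option.ne_none_iff_exists'.mp
      (mt List.getLast?_eq_none_iff.mp hnil)
    have hsplit : (phrase.toList.filter pvPred).dropLast ++ [g] = phrase.toList.filter pvPred :=
      List.dropLast_append_getLast? g hg
    rw [hg, pvPass_some]
    by_cases h : 1 < (phrase.toList.filter pvPred).length
    · rw [if_pos (by simpa using h)]
      rw [pvLoop2_eq (pvIdxs phrase.toList 0) _ phrase.toList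
        (by rw [pvShift_eq _ g hg h]
            simp only [List.length_cons, List.length_dropLast, pvIdxs_length]
            omega),
        pvShift_eq _ g hg h,
        pvWrite_eq_rebuild phrase.toList (g :: (phrase.toList.filter pvPred).dropLast)
          (by simp only [List.length_cons, List.length_dropLast]; omega)]
      rw [show g :: phrase.toList.filter pvPred
            = (g :: (phrase.toList.filter pvPred).dropLast) ++ [g] by
          rw [List.cons_append, hsplit]]
      rw [pvRebuild_cons_split phrase.toList g _
        (by simp only [List.length_dropLast]; omega)]
    · -- exactly one match: the shift is the identity; B consumes g at its own position
      rw [if_neg (by simpa using h)]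
      have hone : phrase.toList.filter pvPred = [g] := by
        have hlen : (phrase.toList.filter pvPred).length = 1 := by
          have := List.length_pos_iff.mpr hnil
          omega
        match hm : phrase.toList.filter pvPred, hlen with
        | [x], _ =>
          rw [hm] at hg
          simp at hg
          rw [hg]
      rw [hone,
        show (g :: [g] : List Char) = ([g] ++ [g] : List Char) from rfl,
        pvRebuild_tail_irrel phrase.toList [g] [g] (by rw [hone]),
        ← hone, pvRebuild_filter]

-- ===== VERDICT (by name: the statement is the Claim_ definition above) =====
theorem reverse_phase_3_spec : Claim_equal_reverse_phase_3 := by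
  intro phrase _ _
  unfold Spec_reverse_phase_3
  exact reverse_phase_3_eq_alt phrase
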